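-- pv_equiv track=rewrite | github.com/SarveshwarSenthilKumar/JittoEngChallenge | JittoEngChallenge/backend.py | find_streak_outcomes
-- ===== SOURCE A (Python) =====
-- from typing import Dict, List, Optional, Any
--
-- def find_streak_outcomes(sequence: List[int]) -> tuple[int, int]:
--     """
--     Find all non-overlapping 2-success streaks and count successful third outcomes.
--
--     Args:
--         sequence: List of binary outcomes
--
--     Returns:
--         Tuple of (total_streaks, successful_third_outcomes)
--     """
--     total_streaks = 0
--     successful_third_outcomes = 0
--     i = 0
--
--     # Scan through sequence looking for 2-success streaks
--     while i < len(sequence) - 2: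
--         # Check if we have two consecutive successes
--         if sequence[i] == 1 and sequence[i + 1] == 1:
--             # We found a 2-success streak, check the outcome after it
--             if sequence[i + 2] == 1:
--                 successful_third_outcomes += 1
--             total_streaks += 1
--             # Skip overlapping streaks by moving 2 positions forward
--             i += 2
--         else:
--             # No streak found, move to next position
--             i += 1
--
--     return total_streaks, successful_third_outcomes
-- ===== SOURCE B (Python) =====
-- def find_streak_outcomes(sequence):
--     # Build a '1'/'0' mask string, collect non-overlapping "11" match end
--     # positions with str.find, then count via comprehensions.
--     s = ''.join('1' if x == 1 else '0' for x in sequence)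
--     ends = []
--     pos = 0
--     while True:
--         j = s.find('11', pos)
--         if j == -1:
--             break
--         ends.append(j + 2)
--         pos = j + 2
--     total = sum(1 for e in ends if e < len(s))
--     succ = sum(1 for e in ends if e < len(s) and s[e] == '1')
--     return total, succ
-- ===== Notes on version B (the rewrite author's own statement) =====
-- stated objective: alternative
-- what changed: Replaces A's single index-stepping while-loop with a three-phase pipeline: build a '1'/'0' mask string, collect non-overlapping '11' match end positions via str.find, then count streaks and successful thirds with comprehensions filtering ends that lie inside the string.
import Mathlib
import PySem

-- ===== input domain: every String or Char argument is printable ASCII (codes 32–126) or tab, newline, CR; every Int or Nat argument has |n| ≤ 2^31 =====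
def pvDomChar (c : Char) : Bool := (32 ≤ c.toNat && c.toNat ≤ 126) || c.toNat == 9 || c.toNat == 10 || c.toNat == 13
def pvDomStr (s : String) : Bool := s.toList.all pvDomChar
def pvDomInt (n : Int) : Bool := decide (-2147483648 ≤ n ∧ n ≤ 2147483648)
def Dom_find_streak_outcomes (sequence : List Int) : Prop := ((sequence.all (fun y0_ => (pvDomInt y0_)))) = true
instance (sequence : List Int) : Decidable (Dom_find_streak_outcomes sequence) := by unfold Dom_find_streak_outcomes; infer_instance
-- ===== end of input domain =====

-- B replaces A's index-stepping while-loop by a mask string, a find-based collection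
-- of non-overlapping "11" match ends, and two counting comprehensions (objective: alternative).

-- ===== PORT A =====
-- A's while-loop: i is a Nat index; Python's 'i < len(sequence) - 2' with i ≥ 0 is
-- exactly 'i + 2 < sequence.length'; all indexing is in range, so getD is exact.
def pvLoopA (s : List Int) (i : Nat) (total succ : Int) : Int × Int :=
  if i + 2 < s.length then
    if s.getD i 0 = 1 ∧ s.getD (i+1) 0 = 1 then
      pvLoopA s (i+2) (total + 1) (succ + if s.getD (i+2) 0 = 1 then 1 else 0)
    else
      pvLoopA s (i+1) total succ
  else (total, succ)
termination_by s.length - i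

def find_streak_outcomes (sequence : List Int) : Int × Int :=
  pvLoopA sequence 0 0 0

-- ===== PORT B =====
-- hand-port of Source B's while/str.find loop: first index j ≥ pos with cs[j]=cs[j+1]='1',
-- collected as match ends j+2 (exact: str.find scans left to right)
def pvFindEnds (cs : List Char) (pos : Nat) : List Nat :=
  if pos + 1 < cs.length then
    if cs.getD pos ' ' = '1' ∧ cs.getD (pos+1) ' ' = '1' then
      (pos + 2) :: pvFindEnds cs (pos + 2)
    else
      pvFindEnds cs (pos + 1)
  else []
termination_by cs.length - pos

def find_streak_outcomes_alt (sequence : List Int) : Int × Int :=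
  let cs : List Char := sequence.map (fun x => if x = 1 then '1' else '0')
  let ends := pvFindEnds cs 0
  (((ends.filter (fun e => e < cs.length)).length : Int),
   ((ends.filter (fun e => decide (e < cs.length) && (cs.getD e ' ' == '1'))).length : Int))

-- ===== PRECONDITION & SPEC =====
def Spec_find_streak_outcomes (sequence : List Int) (out : Int × Int) : Prop := out = find_streak_outcomes_alt sequence
instance (sequence : List Int) (out : Int × Int) : Decidable (Spec_find_streak_outcomes sequence out) := by unfold Spec_find_streak_outcomes; infer_instance

-- ===== CLAIM (what is proved, stated in full; the proofs are below) =====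
def Claim_equal_find_streak_outcomes : Prop := ∀ (sequence : List Int), Dom_find_streak_outcomes sequence → Spec_find_streak_outcomes sequence (find_streak_outcomes sequence)

-- ===== LEMMAS AND PROOFS =====

-- mask lookup agrees with the original list in range
lemma pvMask_getD (s : List Int) (j : Nat) (hj : j < s.length) :
    (s.map (fun x => if x = 1 then '1' else '0')).getD j ' ' = (if s.getD j 0 = 1 then '1' else '0') := by
  simp only [List.getD, List.getElem?_map, List.getElem?_eq_getElem hj, Option.map_some, Option.getD_some]

lemma pvMask_getD_eq_one (s : List Int) (j : Nat) (hj : j < s.length) :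
    ((s.map (fun x => if x = 1 then '1' else '0')).getD j ' ' = '1') ↔ s.getD j 0 = 1 := by
  rw [pvMask_getD s j hj]
  by_cases h : s.getD j 0 = 1
  · rw [if_pos h]; exact iff_of_true rfl h
  · rw [if_neg h]; exact iff_of_false (by decide) h

-- the key invariant: A's loop from index i equals (t,u) plus B's counts of the
-- match ends found from position i (fuel k bounds s.length - i)
lemma pvKey (k : Nat) (s : List Int) (i : Nat) (t u : Int) (hk : s.length - i ≤ k) :
    pvLoopA s i t u =
      (t + (((pvFindEnds (s.map (fun x => if x = 1 then '1' else '0')) i).filter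
              (fun e => e < s.length)).length : Int),
       u + (((pvFindEnds (s.map (fun x => if x = 1 then '1' else '0')) i).filter
              (fun e => decide (e < s.length) && ((s.map (fun x => if x = 1 then '1' else '0')).getD e ' ' == '1'))).length : Int)) := by
  induction k generalizing i t u with
  | zero =>
    rw [pvLoopA, pvFindEnds]
    simp only [List.length_map]
    rw [if_neg (by omega), if_neg (by omega)]
    simp
  | succ k ih =>
    rw [pvLoopA, pvFindEnds]
    simp only [List.length_map]
    by_cases h2 : i + 2 < s.length
    · rw [if_pos h2, if_pos (show i + 1 < s.length by omega)]
      have e0 := pvMask_getD_eq_one s i (by omega)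
      have e1 := pvMask_getD_eq_one s (i+1) (by omega)
      by_cases hm : s.getD i 0 = 1 ∧ s.getD (i+1) 0 = 1
      · rw [if_pos hm, if_pos (And.intro (e0.mpr hm.1) (e1.mpr hm.2))]
        rw [ih (i+2) _ _ (by omega)]
        have h3 := pvMask_getD_eq_one s (i+2) h2
        by_cases h1 : s.getD (i+2) 0 = 1
        · simp only [List.filter_cons, h2, decide_true, h3.mpr h1, h1, if_true,
            BEq.rfl, Bool.and_self, List.length_cons]
          refine Prod.ext ?_ ?_ <;> push_cast <;> ring
        · have hne : ¬ ((s.map (fun x => if x = 1 then '1' else '0')).getD (i+2) ' ' == '1') = true :=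
            fun hc => h1 (h3.mp (by simpa using hc))
          simp only [List.filter_cons, h2, decide_true, h1, if_false, Bool.true_and, if_true]
          rw [if_neg hne]
          simp only [List.length_cons]
          refine Prod.ext ?_ ?_ <;> push_cast <;> ring
      · rw [if_neg hm, if_neg (fun hc => hm ⟨e0.mp hc.1, e1.mp hc.2⟩)]
        exact ih (i+1) t u (by omega)
    · rw [if_neg h2]
      by_cases h1 : i + 1 < s.length
      · rw [if_pos h1]
        by_cases hmm : (s.map (fun x => if x = 1 then '1' else '0')).getD i ' ' = '1' ∧
                       (s.map (fun x => if x = 1 then '1' else '0')).getD (i+1) ' ' = '1'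
        · rw [if_pos hmm, pvFindEnds]
          simp only [List.length_map]
          rw [if_neg (by omega)]
          simp [h2]
        · rw [if_neg hmm, pvFindEnds]
          simp only [List.length_map]
          rw [if_neg (by omega)]
          simp
      · rw [if_neg h1]
        simp

-- ===== VERDICT (by name: the statement is the Claim_ definition above) =====
theorem find_streak_outcomes_spec : Claim_equal_find_streak_outcomes := by
  intro s _
  unfold Spec_find_streak_outcomes find_streak_outcomes find_streak_outcomes_alt
  rw [pvKey s.length s 0 0 0 (by omega)]
  simp
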